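-- pv_equiv track=rewrite | github.com/ctrl-alt-automate/netbox-ssl | netbox_ssl/utils/ca_detector.py | _extract_cn_from_issuer
-- ===== SOURCE A (Python) =====
-- def _extract_cn_from_issuer(issuer: str) -> str | None:
--     """
--     Extract the Common Name (CN) from an issuer Distinguished Name.
--
--     Args:
--         issuer: The issuer DN string (e.g., "C=US, O=Let's Encrypt, CN=E7")
--
--     Returns:
--         The CN value, or None if not found.
--     """
--     # Try to find CN= in the issuer (handles both "CN=" and "CN = ")
--     parts = issuer.split(",")
--     for part in parts:
--         part = part.strip()
--         part_upper = part.upper()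
--         if part_upper.startswith("CN=") or part_upper.startswith("CN ="):
--             # Find the = and return everything after it
--             eq_pos = part.find("=")
--             if eq_pos != -1:
--                 return part[eq_pos + 1:].strip()
--
--     # Also try O= (Organization) as fallback
--     for part in parts:
--         part = part.strip()
--         part_upper = part.upper()
--         if part_upper.startswith("O=") or part_upper.startswith("O ="):
--             eq_pos = part.find("=")
--             if eq_pos != -1:
--                 return part[eq_pos + 1:].strip()
--
--     return None
-- ===== SOURCE B (Python) =====
-- def _extract_cn_from_issuer(issuer: str) -> str | None:
--     """Single pass: record the first CN and first O values in a table, then look up."""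
--     found = {}
--     for part in issuer.split(","):
--         part = part.strip()
--         part_upper = part.upper()
--         if "CN" not in found and (part_upper.startswith("CN=") or part_upper.startswith("CN =")):
--             found["CN"] = part[part.find("=") + 1:].strip()
--         elif "O" not in found and (part_upper.startswith("O=") or part_upper.startswith("O =")):
--             found["O"] = part[part.find("=") + 1:].strip()
--     return found.get("CN", found.get("O"))
-- ===== Notes on version B (the rewrite author's own statement) =====
-- stated objective: alternative
-- what changed: Replaces A's two sequential scans (CN pass, then O fallback pass) with one pass that records the first CN and first O matches in a dict, followed by a table lookup.
import Mathlib
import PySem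

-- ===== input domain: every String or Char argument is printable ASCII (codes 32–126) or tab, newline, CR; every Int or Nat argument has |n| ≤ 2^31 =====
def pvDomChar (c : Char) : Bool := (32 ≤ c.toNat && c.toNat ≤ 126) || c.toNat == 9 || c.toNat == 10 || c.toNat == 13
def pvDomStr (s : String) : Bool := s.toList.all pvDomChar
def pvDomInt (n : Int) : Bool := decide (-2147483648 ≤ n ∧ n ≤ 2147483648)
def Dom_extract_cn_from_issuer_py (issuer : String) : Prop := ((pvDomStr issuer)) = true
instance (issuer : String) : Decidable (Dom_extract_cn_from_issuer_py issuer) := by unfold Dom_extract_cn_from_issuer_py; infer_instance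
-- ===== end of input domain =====

-- B replaces A's two sequential scans (CN pass, then O fallback pass) with ONE pass that
-- records the first CN value and the first O value in a dict, followed by a table lookup.

-- shared prefix tests (the identical Python conditions in A and B)
def pvCondCN (pu : List Char) : Bool :=
  PySem.Chars.startswith pu ['C', 'N', '='] || PySem.Chars.startswith pu ['C', 'N', ' ', '=']

def pvCondO (pu : List Char) : Bool :=
  PySem.Chars.startswith pu ['O', '='] || PySem.Chars.startswith pu ['O', ' ', '=']

-- ===== PORT A =====
-- first loop: return the first CN part's value (skipping, as A does, a match without '=')
def pvLoopCN : List (List Char) → Option (List Char)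
  | [] => none
  | p :: rest =>
    let part := PySem.Chars.strip p
    let pu := PySem.Chars.upper part
    if pvCondCN pu then
      let eqPos := PySem.Chars.find part ['=']
      if eqPos ≠ -1 then
        some (PySem.Chars.strip (PySem.Chars.slice part (some (eqPos + 1)) none))
      else pvLoopCN rest
    else pvLoopCN rest

-- second loop: the O= fallback
def pvLoopO : List (List Char) → Option (List Char)
  | [] => none
  | p :: rest =>
    let part := PySem.Chars.strip p
    let pu := PySem.Chars.upper part
    if pvCondO pu then
      let eqPos := PySem.Chars.find part ['=']
      if eqPos ≠ -1 then
        some (PySem.Chars.strip (PySem.Chars.slice part (some (eqPos + 1)) none))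
      else pvLoopO rest
    else pvLoopO rest

def extract_cn_from_issuer_py (issuer : String) : Option String :=
  let parts := PySem.Chars.splitOn issuer.toList [',']
  match pvLoopCN parts with
  | some v => some (String.ofList v)
  | none => (pvLoopO parts).map String.ofList

-- ===== PORT B =====
-- part[part.find("=") + 1:].strip()
def pvVal (part : List Char) : List Char :=
  PySem.Chars.strip (PySem.Chars.slice part (some (PySem.Chars.find part ['='] + 1)) none)

-- one iteration of B's single loop over the parts
def pvStep (d : PySem.Dict String (List Char)) (p : List Char) : PySem.Dict String (List Char) :=
  let part := PySem.Chars.strip p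
  let pu := PySem.Chars.upper part
  if !d.contains "CN" && pvCondCN pu then d.insert "CN" (pvVal part)
  else if !d.contains "O" && pvCondO pu then d.insert "O" (pvVal part)
  else d

def extract_cn_from_issuer_py_alt (issuer : String) : Option String :=
  let found := (PySem.Chars.splitOn issuer.toList [',']).foldl pvStep PySem.Dict.empty
  -- found.get("CN", found.get("O"))
  (match found.get? "CN" with
   | some v => some v
   | none => found.get? "O").map String.ofList

-- ===== PRECONDITION & SPEC =====
def Spec_extract_cn_from_issuer_py (issuer : String) (out : Option String) : Prop := out = extract_cn_from_issuer_py_alt issuer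
instance (issuer : String) (out : Option String) : Decidable (Spec_extract_cn_from_issuer_py issuer out) := by unfold Spec_extract_cn_from_issuer_py; infer_instance

-- ===== CLAIM (what is proved, stated in full; the proofs are below) =====
def Claim_equal_extract_cn_from_issuer_py : Prop := ∀ (issuer : String), Dom_extract_cn_from_issuer_py issuer → Spec_extract_cn_from_issuer_py issuer (extract_cn_from_issuer_py issuer)

-- ===== LEMMAS AND PROOFS =====

-- only '=' upper-cases to '='
lemma upperChar_eq_eq {a : Char} (h : PySem.Chars.upperChar a = '=') : a = '=' := by
  unfold PySem.Chars.upperChar PySem.Chars.islower at h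
  split_ifs at h with hl
  · exfalso
    simp only [Bool.and_eq_true, decide_eq_true_eq] at hl
    have h1 : 'a' ≤ a := hl.1
    have h2 : a ≤ 'z' := hl.2
    have hlo : 97 ≤ a.toNat := h1
    have hhi : a.toNat ≤ 122 := h2
    have hv : (Char.ofNat (a.toNat - 32)).toNat = a.toNat - 32 := by
      rw [Char.toNat_ofNat]
      rw [if_pos]
      left; omega
    have h61 := congrArg Char.toNat h
    rw [hv, show ('=' : Char).toNat = 61 from rfl] at h61
    omega
  · exact h

-- a matched part contains '=', so A's 'eq_pos != -1' test always succeeds there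
lemma find_ne_of_cond {part : List Char}
    (h : pvCondCN (PySem.Chars.upper part) = true ∨ pvCondO (PySem.Chars.upper part) = true) :
    PySem.Chars.find part ['='] ≠ -1 := by
  have hmem : '=' ∈ PySem.Chars.upper part := by
    unfold pvCondCN pvCondO PySem.Chars.startswith at h
    rcases h with h | h <;> rcases Bool.or_eq_true_iff.mp h with h' | h' <;>
      exact (List.isPrefixOf_iff_prefix.mp h').mem (by simp)
  rw [PySem.Chars.find_ne_neg_one_iff]
  unfold PySem.Chars.upper at hmem
  obtain ⟨a, ha, hua⟩ := List.mem_map.mp hmem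
  have : a = '=' := upperChar_eq_eq hua
  exact (List.singleton_infix_iff '=' part).mpr (this ▸ ha)

-- a CN-prefixed part is never O-prefixed
lemma condO_false_of_condCN {pu : List Char} (h : pvCondCN pu = true) : pvCondO pu = false := by
  unfold pvCondCN PySem.Chars.startswith at h
  have hC : pu.head? = some 'C' := by
    rcases Bool.or_eq_true_iff.mp h with h' | h' <;>
    · obtain ⟨t, ht⟩ := List.isPrefixOf_iff_prefix.mp h'
      rw [← ht]; rfl
  unfold pvCondO PySem.Chars.startswith
  rw [Bool.or_eq_false_iff]
  constructor <;>
  · rw [Bool.eq_false_iff]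
    intro h'
    obtain ⟨t, ht⟩ := List.isPrefixOf_iff_prefix.mp h'
    rw [← ht] at hC
    simp at hC

-- loop invariant: B's fold records exactly the first CN match and the first O match
lemma fold_get (ps : List (List Char)) (d : PySem.Dict String (List Char)) :
    ((ps.foldl pvStep d).get? "CN" = (d.get? "CN").or (pvLoopCN ps)) ∧
    ((ps.foldl pvStep d).get? "O" = (d.get? "O").or (pvLoopO ps)) := by
  induction ps generalizing d with
  | nil => simp [pvLoopCN, pvLoopO]
  | cons p rest ih =>
    simp only [List.foldl_cons]
    by_cases hCN : pvCondCN (PySem.Chars.upper (PySem.Chars.strip p)) = true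
    · have hO := condO_false_of_condCN hCN
      have hfind := find_ne_of_cond (part := PySem.Chars.strip p) (Or.inl hCN)
      have hA : pvLoopCN (p :: rest) = some (pvVal (PySem.Chars.strip p)) := by
        simp [pvLoopCN, hCN, hfind, pvVal]
      have hAO : pvLoopO (p :: rest) = pvLoopO rest := by
        simp [pvLoopO, hO]
      rw [hA, hAO]
      cases hc : (d.get? "CN") with
      | none =>
        have hstep : pvStep d p = d.insert "CN" (pvVal (PySem.Chars.strip p)) := by
          simp [pvStep, hCN, PySem.Dict.contains_eq_isSome_get?, hc]
        rw [hstep]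
        refine ⟨?_, ?_⟩
        · rw [(ih _).1, PySem.Dict.get?_insert_self]; simp
        · rw [(ih _).2, PySem.Dict.get?_insert_of_ne _ _ (by decide)]
      | some c =>
        have hstep : pvStep d p = d := by
          simp [pvStep, hCN, hO, PySem.Dict.contains_eq_isSome_get?, hc]
        rw [hstep]
        refine ⟨?_, ?_⟩
        · rw [(ih _).1, hc]; simp
        · exact (ih _).2
    · have hA : pvLoopCN (p :: rest) = pvLoopCN rest := by
        simp [pvLoopCN, hCN]
      rw [hA]
      by_cases hO : pvCondO (PySem.Chars.upper (PySem.Chars.strip p)) = true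
      · have hfind := find_ne_of_cond (part := PySem.Chars.strip p) (Or.inr hO)
        have hAO : pvLoopO (p :: rest) = some (pvVal (PySem.Chars.strip p)) := by
          simp [pvLoopO, hO, hfind, pvVal]
        rw [hAO]
        cases hc : (d.get? "O") with
        | none =>
          have hstep : pvStep d p = d.insert "O" (pvVal (PySem.Chars.strip p)) := by
            simp [pvStep, hCN, hO, PySem.Dict.contains_eq_isSome_get?, hc]
          rw [hstep]
          refine ⟨?_, ?_⟩
          · rw [(ih _).1, PySem.Dict.get?_insert_of_ne _ _ (by decide)]
          · rw [(ih _).2, PySem.Dict.get?_insert_self]; simp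
        | some c =>
          have hstep : pvStep d p = d := by
            simp [pvStep, hCN, hO, PySem.Dict.contains_eq_isSome_get?, hc]
          rw [hstep]
          refine ⟨(ih _).1, ?_⟩
          rw [(ih _).2, hc]; simp
      · have hAO : pvLoopO (p :: rest) = pvLoopO rest := by
          simp [pvLoopO, hO]
        rw [hAO]
        have hstep : pvStep d p = d := by
          simp [pvStep, hCN, hO]
        rw [hstep]; exact ih d

-- ===== VERDICT (by name: the statement is the Claim_ definition above) =====
theorem extract_cn_from_issuer_py_spec : Claim_equal_extract_cn_from_issuer_py := by
  intro issuer _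
  unfold Spec_extract_cn_from_issuer_py extract_cn_from_issuer_py extract_cn_from_issuer_py_alt
  obtain ⟨h1, h2⟩ := fold_get (PySem.Chars.splitOn issuer.toList [',']) PySem.Dict.empty
  have he : (PySem.Dict.empty : PySem.Dict String (List Char)).get? "CN" = none := rfl
  have he' : (PySem.Dict.empty : PySem.Dict String (List Char)).get? "O" = none := rfl
  rw [he, Option.none_or] at h1
  rw [he', Option.none_or] at h2
  simp only [h1, h2]
  cases pvLoopCN (PySem.Chars.splitOn issuer.toList [',']) with
  | none => rfl
  | some v => rfl
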